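-- pv_equiv track=rewrite | github.com/jk-jung/problem-solving | codewars/6kyu/6_Odder than the rest.py | oddest
-- ===== SOURCE A (Python) =====
-- def oddest(v):
--     def f(a):
--         r = 0
--         while a % 2:
--             r += 1
--             a //= 2
--             if a == -1: return 1 << 30
--         return r
--     if not v: return None
--     m = max(f(x) for x in v)
--     v = [x for x in v if f(x) == m]
--     return v[0] if len(v) == 1 else None
-- ===== SOURCE B (Python) =====
-- def oddest(v):
--     def f(a):
--         r = 0
--         while a % 2:
--             r += 1
--             a //= 2
--             if a == -1: return 1 << 30
--         return r
--     best_m = None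
--     best_x = None
--     count = 0
--     for x in v:
--         m = f(x)
--         if best_m is None or m > best_m:
--             best_m, best_x, count = m, x, 1
--         elif m == best_m:
--             count += 1
--     if count == 0:
--         return None
--     return best_x if count == 1 else None
-- ===== Notes on version B (the rewrite author's own statement) =====
-- stated objective: simpler
-- what changed: Replaced the three passes (max over f-values, filter by the max, length check) by one pass that keeps the best trailing-ones metric, its first element and a tie count, calling f once per element instead of twice.
import Mathlib
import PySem

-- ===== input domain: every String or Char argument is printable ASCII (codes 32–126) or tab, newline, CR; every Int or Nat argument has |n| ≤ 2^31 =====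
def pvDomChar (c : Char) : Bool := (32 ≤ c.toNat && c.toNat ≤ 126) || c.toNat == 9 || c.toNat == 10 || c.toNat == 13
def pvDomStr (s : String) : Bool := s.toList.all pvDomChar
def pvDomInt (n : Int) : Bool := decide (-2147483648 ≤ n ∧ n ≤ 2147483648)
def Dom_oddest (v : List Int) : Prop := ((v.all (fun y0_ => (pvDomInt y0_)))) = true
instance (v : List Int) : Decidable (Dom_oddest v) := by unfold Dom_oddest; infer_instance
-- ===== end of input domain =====

-- B replaces A's three passes (max, filter, length test) by one fold keeping (best metric, first best element, tie count); same helper f, called once per element; objective: simpler.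

-- ===== PORT A =====
-- helper f, identical in Source A and Source B: trailing-ones loop with the 1<<30 sentinel for a reaching -1
def fTO (a : Int) (r : Int) : Int :=
  if PySem.Int.mod a 2 ≠ 0 then
    let a' := PySem.Int.floordiv a 2
    if a' = -1 then (1 <<< 30 : Int) else fTO a' (r + 1)
  else r
termination_by a.natAbs
decreasing_by
  rename_i h1 h2
  have h2' : PySem.Int.floordiv a 2 ≠ -1 := h2
  rw [PySem.Int.floordiv_eq_ediv_of_pos (by norm_num)] at h2' ⊢
  rw [PySem.Int.mod_eq_emod_of_pos (by norm_num)] at h1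
  omega

def oddest (v : List Int) : Option Int :=
  if v = [] then none
  else
    let m := (PySem.List.max? (v.map (fun x => fTO x 0)) (fun y => y)).getD 0
    let w := v.filter (fun x => decide (fTO x 0 = m))
    if w.length = 1 then PySem.List.pyGet? w 0 else none

-- ===== PORT B =====
def oddestStep (st : Option (Int × Int × Int)) (x : Int) : Option (Int × Int × Int) :=
  let m := fTO x 0
  match st with
  | none => some (m, x, 1)
  | some (bm, bx, c) =>
    if m > bm then some (m, x, 1)
    else if m = bm then some (bm, bx, c + 1)
    else some (bm, bx, c)

def oddest_alt (v : List Int) : Option Int :=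
  match v.foldl oddestStep none with
  | none => none
  | some (_, bx, c) => if c = (1 : Int) then some bx else none

-- ===== PRECONDITION & SPEC =====
def Spec_oddest (v : List Int) (out : Option Int) : Prop := out = oddest_alt v
instance (v : List Int) (out : Option Int) : Decidable (Spec_oddest v out) := by unfold Spec_oddest; infer_instance

-- ===== CLAIM (what is proved, stated in full; the proofs are below) =====
def Claim_equal_oddest : Prop := ∀ (v : List Int), Dom_oddest v → Spec_oddest v (oddest v)

-- ===== LEMMAS AND PROOFS =====

-- running maximum of f-values over l, seeded with bm
def runM (bm : Int) (l : List Int) : Int := l.foldl (fun a x => max a (fTO x 0)) bm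

lemma le_runM (l : List Int) (bm : Int) : bm ≤ runM bm l := by
  induction l generalizing bm with
  | nil => simp [runM]
  | cons x t ih =>
    have := ih (max bm (fTO x 0))
    simp only [runM, List.foldl_cons] at *
    exact le_trans (le_max_left _ _) this

lemma runM_cons (bm x : Int) (t : List Int) :
    runM bm (x :: t) = runM (max bm (fTO x 0)) t := rfl

-- L1: no element of t beats bm → the fold only bumps the count by the number of ties
lemma fold_flat (t : List Int) : ∀ (bm bx c : Int), runM bm t = bm →
    t.foldl oddestStep (some (bm, bx, c)) =
      some (bm, bx, c + ((t.filter (fun x => decide (fTO x 0 = bm))).length : Int)) := by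
  induction t with
  | nil => intro bm bx c _; simp
  | cons x t ih =>
    intro bm bx c h
    have hle : fTO x 0 ≤ bm := by
      have h1 := le_runM t (max bm (fTO x 0))
      rw [runM_cons] at h
      rw [h] at h1
      exact le_trans (le_max_right _ _) h1
    have hmax : max bm (fTO x 0) = bm := max_eq_left hle
    have ht : runM bm t = bm := by rw [runM_cons, hmax] at h; exact h
    by_cases he : fTO x 0 = bm
    · have : t.foldl oddestStep (some (bm, bx, c + 1)) =
          some (bm, bx, (c + 1) + ((t.filter (fun x => decide (fTO x 0 = bm))).length : Int)) :=
        ih bm bx (c + 1) ht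
      simp only [List.foldl_cons, oddestStep, he, lt_irrefl, ite_false, ite_true]
      rw [this]
      simp [he]
      omega
    · have hlt : ¬ (fTO x 0 > bm) := not_lt.mpr hle
      simp only [List.foldl_cons, oddestStep, if_neg hlt, if_neg he]
      rw [ih bm bx c ht]
      simp [he]

-- L2: some element of t beats bm → the result is determined by t alone
lemma fold_beat (t : List Int) : ∀ (bm bx c : Int), bm < runM bm t →
    t.foldl oddestStep (some (bm, bx, c)) =
      some (runM bm t,
            (t.filter (fun x => decide (fTO x 0 = runM bm t))).headI,
            ((t.filter (fun x => decide (fTO x 0 = runM bm t))).length : Int)) := by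
  induction t with
  | nil => intro bm bx c h; simp [runM] at h
  | cons x t ih =>
    intro bm bx c h
    by_cases hgt : fTO x 0 > bm
    · have hmax : max bm (fTO x 0) = fTO x 0 := max_eq_right (le_of_lt hgt)
      have hm : runM bm (x :: t) = runM (fTO x 0) t := by rw [runM_cons, hmax]
      by_cases heq : runM (fTO x 0) t = fTO x 0
      · -- x itself attains the overall max
        have := fold_flat t (fTO x 0) x 1 heq
        simp only [List.foldl_cons, oddestStep, if_pos hgt]
        rw [this, hm, heq]
        simp
        omega
      · have hlt : fTO x 0 < runM (fTO x 0) t :=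
          lt_of_le_of_ne (le_runM t (fTO x 0)) (fun e => heq e.symm)
        have := ih (fTO x 0) x 1 hlt
        simp only [List.foldl_cons, oddestStep, if_pos hgt]
        rw [this, hm]
        have hne : ¬ (fTO x 0 = runM (fTO x 0) t) := ne_of_lt hlt
        simp [hne]
    · have hle : fTO x 0 ≤ bm := not_lt.mp hgt
      have hmax : max bm (fTO x 0) = bm := max_eq_left hle
      have hm : runM bm (x :: t) = runM bm t := by rw [runM_cons, hmax]
      have ht : bm < runM bm t := by rw [hm] at h; exact h
      have hne : ¬ (fTO x 0 = runM bm t) := by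
        intro e; rw [e] at hle; exact absurd ht (not_lt.mpr hle)
      by_cases heq : fTO x 0 = bm
      · simp only [List.foldl_cons, oddestStep, if_neg hgt, if_pos heq]
        rw [ih bm bx (c + 1) ht, hm]
        simp [hne]
      · simp only [List.foldl_cons, oddestStep, if_neg hgt, if_neg heq]
        rw [ih bm bx c ht, hm]
        simp [hne]

lemma max_eq_runM (x : Int) (t : List Int) :
    (PySem.List.max? ((x :: t).map (fun y => fTO y 0)) (fun y => y)).getD 0 = runM (fTO x 0) t := by
  rw [List.map_cons, PySem.List.max?_id_cons]
  simp [runM, List.foldl_map]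

lemma pyGet?_singleton_len (w : List Int) (h : w.length = 1) :
    PySem.List.pyGet? w 0 = some w.headI := by
  match w, h with
  | [y], _ => rfl

-- ===== VERDICT (by name: the statement is the Claim_ definition above) =====
theorem oddest_spec : Claim_equal_oddest := by
  intro v _
  unfold Spec_oddest
  match v with
  | [] => rfl
  | x :: t =>
    unfold oddest oddest_alt
    rw [if_neg (by simp)]
    simp only [max_eq_runM]
    have hstep : (x :: t).foldl oddestStep none = t.foldl oddestStep (some (fTO x 0, x, 1)) := rfl
    by_cases heq : runM (fTO x 0) t = fTO x 0
    · rw [hstep, fold_flat t (fTO x 0) x 1 heq, heq]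
      have hw : (x :: t).filter (fun y => decide (fTO y 0 = fTO x 0)) =
          x :: t.filter (fun y => decide (fTO y 0 = fTO x 0)) := by simp
      rw [hw]
      by_cases hz : (t.filter (fun y => decide (fTO y 0 = fTO x 0))).length = 0
      · simp [List.length_eq_zero_iff.mp hz, PySem.List.pyGet?, PySem.List.pyIdx?]
      · have hz' : 0 < (t.filter (fun y => decide (fTO y 0 = fTO x 0))).length :=
          Nat.pos_of_ne_zero hz
        have h1 : ¬ ((x :: t.filter (fun y => decide (fTO y 0 = fTO x 0))).length = 1) := by
          simp only [List.length_cons]; omega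
        have h2 : ¬ ((1 : Int) + ((t.filter (fun y => decide (fTO y 0 = fTO x 0))).length : Int) = 1) := by
          omega
        simp only [if_neg h1, if_neg h2]
    · have hlt : fTO x 0 < runM (fTO x 0) t :=
        lt_of_le_of_ne (le_runM t (fTO x 0)) (fun e => heq e.symm)
      rw [hstep, fold_beat t (fTO x 0) x 1 hlt]
      have hne : ¬ (fTO x 0 = runM (fTO x 0) t) := ne_of_lt hlt
      have hw : (x :: t).filter (fun y => decide (fTO y 0 = runM (fTO x 0) t)) =
          t.filter (fun y => decide (fTO y 0 = runM (fTO x 0) t)) := by simp [hne]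
      rw [hw]
      by_cases h1 : (t.filter (fun y => decide (fTO y 0 = runM (fTO x 0) t))).length = 1
      · rw [if_pos h1, pyGet?_singleton_len _ h1]
        simp [h1]
      · rw [if_neg h1]
        have : ¬ (((t.filter (fun y => decide (fTO y 0 = runM (fTO x 0) t))).length : Int) = 1) := by
          omega
        simp [this]
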